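-- pv_equiv track=rewrite | github.com/Tom-Owl/OverlookedRLF | code/data_utils.py | merge_short_items
-- ===== SOURCE A (Python) =====
-- def merge_short_items(input_list):
--     # Initialize an empty list to hold the output
--     output_list = []
--     # Iterate through the input list
--     for item in input_list:
--         # Check if the current item's length is smaller than 5 or if it's mergeable punctuation,
--         # and also ensure the output list is not empty before merging
--         if (len(item) < 5 or item in {'.', '!', '?', ','}) and output_list:
--             if item in {'.', '!', '?', ','}:
--                 output_list[-1] += item
--             else:
--                 output_list[-1] += ' ' + item
--         else:
--             output_list.append(item)
--     return output_list
-- ===== SOURCE B (Python) =====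
-- PUNCT = {'.', '!', '?', ','}
--
-- def _mergeable(item):
--     return len(item) < 5 or item in PUNCT
--
-- def _segments(input_list):
--     # Split the list into maximal runs: a boundary item followed by its mergeable tail.
--     segs = []
--     i, n = 0, len(input_list)
--     while i < n:
--         j = i + 1
--         while j < n and _mergeable(input_list[j]):
--             j += 1
--         segs.append(input_list[i:j])
--         i = j
--     return segs
--
-- def merge_short_items(input_list):
--     # Staged algorithm: first materialize the segments, then join each segment
--     # into one string, prefixing punctuation with '' and other items with ' '.
--     return [seg[0] + ''.join(('' if it in PUNCT else ' ') + it for it in seg[1:])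
--             for seg in _segments(input_list)]
-- ===== Notes on version B (the rewrite author's own statement) =====
-- stated objective: alternative
-- what changed: B is a staged algorithm: it first splits the input into maximal segments (a boundary item plus its run of mergeable followers, found by inner takeWhile-style scans) and then joins each segment with ''.join over per-item separator-prefixed pieces, instead of A's single pass mutating the last element of a growing output list.
import Mathlib
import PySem

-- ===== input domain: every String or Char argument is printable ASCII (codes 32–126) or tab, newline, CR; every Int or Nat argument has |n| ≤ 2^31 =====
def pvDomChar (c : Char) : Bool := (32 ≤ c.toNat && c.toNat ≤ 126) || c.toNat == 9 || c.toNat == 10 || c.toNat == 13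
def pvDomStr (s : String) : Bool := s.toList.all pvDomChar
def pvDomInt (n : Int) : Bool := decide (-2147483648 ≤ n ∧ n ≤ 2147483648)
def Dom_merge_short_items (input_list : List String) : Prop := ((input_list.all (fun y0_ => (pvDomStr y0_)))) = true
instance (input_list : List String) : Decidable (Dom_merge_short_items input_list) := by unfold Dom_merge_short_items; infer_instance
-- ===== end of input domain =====

-- B replaces A's single-pass mutate-the-last-element accumulator with a staged
-- algorithm: segment the input into boundary-led runs, then join each segment.
-- Same return value; no speed claim.

-- ===== PORT A =====
def pvPunct (s : String) : Bool := s == "." || s == "!" || s == "?" || s == ","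

-- port of Python's `output_list[-1] += s` (output_list is nonempty at that point)
def msiSetLast (out : List String) (s : String) : List String :=
  match out with
  | [] => []
  | [x] => [x ++ s]
  | x :: xs => x :: msiSetLast xs s

def msiStepA (out : List String) (item : String) : List String :=
  if (PySem.Str.len item < 5 || pvPunct item) && !out.isEmpty then
    if pvPunct item then msiSetLast out item
    else msiSetLast out (" " ++ item)
  else out ++ [item]

def merge_short_items (input_list : List String) : List String :=
  input_list.foldl msiStepA []

-- ===== PORT B =====
def msiMergeable (item : String) : Bool :=
  PySem.Str.len item < 5 || pvPunct item

-- `_segments`: maximal runs, each a boundary item followed by its mergeable tail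
def msiSegments : List String → List (List String)
  | [] => []
  | x :: xs =>
    (x :: xs.takeWhile msiMergeable) :: msiSegments (xs.dropWhile msiMergeable)
termination_by l => l.length
decreasing_by
  exact Nat.lt_succ_of_le (List.length_dropWhile_le _ _)

-- `('' if it in PUNCT else ' ') + it`
def msiPiece (it : String) : String := (if pvPunct it then "" else " ") ++ it

-- `seg[0] + ''.join(...)`
def msiJoinSeg (seg : List String) : String :=
  match seg with
  | [] => ""
  | h :: t => h ++ String.join (t.map msiPiece)

def merge_short_items_alt (input_list : List String) : List String :=
  (msiSegments input_list).map msiJoinSeg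

-- ===== PRECONDITION & SPEC =====
def Spec_merge_short_items (input_list : List String) (out : List String) : Prop := out = merge_short_items_alt input_list
instance (input_list : List String) (out : List String) : Decidable (Spec_merge_short_items input_list out) := by unfold Spec_merge_short_items; infer_instance

-- ===== CLAIM (what is proved, stated in full; the proofs are below) =====
def Claim_equal_merge_short_items : Prop := ∀ (input_list : List String), Dom_merge_short_items input_list → Spec_merge_short_items input_list (merge_short_items input_list)

-- ===== LEMMAS AND PROOFS =====

-- common recursive characterisation of the result from a current group `cur`
def msiFrom (cur : String) : List String → List String
  | [] => [cur]
  | x :: xs =>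
    if msiMergeable x then msiFrom (cur ++ msiPiece x) xs
    else cur :: msiFrom x xs

theorem msiSetLast_append (acc : List String) (cur s : String) :
    msiSetLast (acc ++ [cur]) s = acc ++ [cur ++ s] := by
  induction acc with
  | nil => rfl
  | cons a t ih =>
    cases t with
    | nil => simp [msiSetLast]
    | cons b u => simpa [msiSetLast] using ih

-- A's fold computes msiFrom
theorem msiA_from (rest : List String) (acc : List String) (cur : String) :
    rest.foldl msiStepA (acc ++ [cur]) = acc ++ msiFrom cur rest := by
  induction rest generalizing acc cur with
  | nil => rfl
  | cons x xs ih =>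
    simp only [List.foldl_cons, msiFrom]
    by_cases h : msiMergeable x = true
    · have hne : ((acc ++ [cur]).isEmpty) = false := by simp
      by_cases hp : pvPunct x = true
      · rw [show msiStepA (acc ++ [cur]) x = acc ++ [cur ++ msiPiece x] by
          simp [msiStepA, msiPiece, hp, hne, msiSetLast_append]]
        simpa [h] using ih acc (cur ++ msiPiece x)
      · have hl : PySem.Str.len x < 5 := by
          simpa [msiMergeable, hp] using h
        rw [show msiStepA (acc ++ [cur]) x = acc ++ [cur ++ msiPiece x] by
          simp [msiStepA, msiPiece, hp, hne, msiSetLast_append, PySem.Str.len] at hl ⊢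
          omega]
        simpa [h] using ih acc (cur ++ msiPiece x)
    · have h' : msiMergeable x = false := by simpa using h
      rw [show msiStepA (acc ++ [cur]) x = (acc ++ [cur]) ++ [x] by
        simp [msiStepA, msiMergeable] at h' ⊢
        simp [h'.1, h'.2]]
      simpa [h'] using ih (acc ++ [cur]) x

theorem msiSegments_nil : msiSegments [] = [] := by
  rw [msiSegments.eq_def]

theorem msiSegments_cons (x : String) (xs : List String) :
    msiSegments (x :: xs) =
      (x :: xs.takeWhile msiMergeable) :: msiSegments (xs.dropWhile msiMergeable) := by
  rw [msiSegments.eq_def]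

theorem msiFoldl_append (l : List String) (a : String) :
    l.foldl (fun r s => r ++ s) a = a ++ l.foldl (fun r s => r ++ s) "" := by
  induction l generalizing a with
  | nil => simp
  | cons x t ih =>
    simp only [List.foldl_cons]
    rw [ih (a ++ x), show ("" ++ x : String) = x by simp]
    conv_rhs => rw [ih x]
    simp [String.append_assoc]

-- B's segments-then-join computes msiFrom too
theorem msiB_from (xs : List String) (cur : String) :
    msiJoinSeg (cur :: xs.takeWhile msiMergeable) ::
      (msiSegments (xs.dropWhile msiMergeable)).map msiJoinSeg = msiFrom cur xs := by
  induction xs generalizing cur with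
  | nil => simp [msiJoinSeg, msiSegments_nil, msiFrom, String.join]
  | cons x t ih =>
    by_cases h : msiMergeable x = true
    · simp only [msiFrom, h, List.takeWhile_cons, List.dropWhile_cons, if_true]
      rw [← ih (cur ++ msiPiece x)]
      simp only [msiJoinSeg, String.join, List.map_cons, List.foldl_cons]
      rw [msiFoldl_append]
      simp [String.append_assoc]
    · simp only [msiFrom, List.takeWhile_cons, List.dropWhile_cons, if_neg h]
      rw [msiSegments_cons]
      simp only [List.map_cons]
      rw [← ih x]
      simp [msiJoinSeg, String.join]

-- ===== VERDICT (by name: the statement is the Claim_ definition above) =====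
theorem merge_short_items_spec : Claim_equal_merge_short_items := by
  intro input_list _
  unfold Spec_merge_short_items merge_short_items merge_short_items_alt
  cases input_list with
  | nil => rw [msiSegments_nil]; rfl
  | cons x xs =>
    have h0 : msiStepA [] x = [x] := by simp [msiStepA]
    rw [List.foldl_cons, h0, show ([x] : List String) = [] ++ [x] from rfl,
      msiA_from, msiSegments_cons]
    simpa using (msiB_from xs x).symm
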